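-- pv_equiv track=rewrite | github.com/chkypros/AdventOfCode | AdventOfCodePython/src/aoc2023/day6/wait_for_it.py | _find_next_win_hold
-- ===== SOURCE A (Python) =====
-- def _travel_with_hold(hold_time, total_time):
--     return (total_time - hold_time) * hold_time
--
-- def _find_next_win_hold(time, distance, step):
--     # Ignoring holding for 0 seconds or all time
--     (start, end) = (1, time - 1) if step == 1 else (time - 1, 1)
--     index = start
--
--     while index != end:
--         if (_travel_with_hold(index, time) > distance):
--             return index
--         index += step
--
--     return None
-- ===== SOURCE B (Python) =====
-- def _travel_with_hold(hold_time, total_time):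
--     return (total_time - hold_time) * hold_time
--
-- def _find_next_win_hold(time, distance, step):
--     # Binary search over hold times: wins(h) = (time-h)*h > distance is
--     # monotone increasing on [1, time//2] and decreasing on [(time+1)//2, time-1],
--     # and its maximum is at the midpoint, so a single binary search from the
--     # requested end replaces the linear scan.
--     if time < 3:
--         return None
--     def wins(h):
--         return (time - h) * h > distance
--     if step == 1:
--         lo, hi = 1, time // 2
--         if not wins(hi):
--             return None
--         # least h in [lo, hi] with wins(h)
--         while lo < hi:
--             mid = (lo + hi) // 2
--             if wins(mid):
--                 hi = mid
--             else:
--                 lo = mid + 1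
--         return lo
--     else:
--         lo, hi = (time + 1) // 2, time - 1
--         if not wins(lo):
--             return None
--         # greatest h in [lo, hi] with wins(h)
--         while lo < hi:
--             mid = (lo + hi + 1) // 2
--             if wins(mid):
--                 lo = mid
--             else:
--                 hi = mid - 1
--         return lo
-- ===== Notes on version B (the rewrite author's own statement) =====
-- stated objective: alternative
-- what changed: Replaces A's linear scan of hold times with a binary search on the monotone half of the concave win predicate (least winner from the low end for step=1, greatest from the high end otherwise), after an argmax test at time//2 decides existence.
-- outside the precondition, e.g. on _find_next_win_hold(10, 9, -2): A returns 7, B returns 8; on _find_next_win_hold(0, -10, 1): A returns 1, B returns None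
import Mathlib
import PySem

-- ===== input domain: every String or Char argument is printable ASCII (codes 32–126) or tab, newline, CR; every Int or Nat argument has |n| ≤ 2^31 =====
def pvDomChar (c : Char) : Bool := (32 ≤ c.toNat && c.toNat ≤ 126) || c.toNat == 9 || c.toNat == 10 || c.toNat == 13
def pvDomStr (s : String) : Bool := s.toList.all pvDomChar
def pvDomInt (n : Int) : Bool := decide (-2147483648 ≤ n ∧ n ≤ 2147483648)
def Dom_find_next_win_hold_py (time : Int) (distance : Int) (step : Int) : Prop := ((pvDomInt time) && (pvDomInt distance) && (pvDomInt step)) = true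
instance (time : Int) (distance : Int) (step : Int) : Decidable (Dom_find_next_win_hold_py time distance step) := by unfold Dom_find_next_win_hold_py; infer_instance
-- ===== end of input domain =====

-- B replaces A's linear scan of hold times by a binary search on the monotone half of
-- the concave win predicate; equivalence is proved on Pre_ below.

-- ===== PORT A =====
def travel_with_hold_py (hold_time : Int) (total_time : Int) : Int :=
  (total_time - hold_time) * hold_time

-- the while-loop of A; fuel bounds the number of loop-condition checks (enough on Pre_)
def pyWhileA (time : Int) (distance : Int) (step : Int) (endv : Int) : Int → Nat → Option Int
  | _, 0 => none
  | index, Nat.succ f =>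
    if index = endv then none
    else if travel_with_hold_py index time > distance then some index
    else pyWhileA time distance step endv (index + step) f

def find_next_win_hold_py (time : Int) (distance : Int) (step : Int) : Option Int :=
  if step = 1 then pyWhileA time distance step (time - 1) 1 ((time - 2).natAbs + 1)
  else pyWhileA time distance step 1 (time - 1) ((time - 2).natAbs + 1)

-- ===== PORT B =====
def winsB (time : Int) (distance : Int) (h : Int) : Bool :=
  decide ((time - h) * h > distance)

-- least h in [lo, hi] with winsB (given winsB hi and monotonicity); fuel = hi - lo
def bsearchLowB (time : Int) (distance : Int) : Int → Int → Nat → Int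
  | lo, _, 0 => lo
  | lo, hi, Nat.succ f =>
    if lo < hi then
      let mid := PySem.Int.floordiv (lo + hi) 2
      if winsB time distance mid then bsearchLowB time distance lo mid f
      else bsearchLowB time distance (mid + 1) hi f
    else lo

-- greatest h in [lo, hi] with winsB (given winsB lo and antitonicity); fuel = hi - lo
def bsearchHighB (time : Int) (distance : Int) : Int → Int → Nat → Int
  | lo, _, 0 => lo
  | lo, hi, Nat.succ f =>
    if lo < hi then
      let mid := PySem.Int.floordiv (lo + hi + 1) 2
      if winsB time distance mid then bsearchHighB time distance mid hi f
      else bsearchHighB time distance lo (mid - 1) f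
    else lo

def find_next_win_hold_py_alt (time : Int) (distance : Int) (step : Int) : Option Int :=
  if time < 3 then none
  else if step = 1 then
    let hi := PySem.Int.floordiv time 2
    if winsB time distance hi then
      some (bsearchLowB time distance 1 hi (hi - 1).toNat)
    else none
  else
    let lo := PySem.Int.floordiv (time + 1) 2
    if winsB time distance lo then
      some (bsearchHighB time distance lo (time - 1) (time - 1 - lo).toNat)
    else none

-- ===== PRECONDITION & SPEC =====
-- Pre_ keeps the natural domain (race time ≥ 2; scans stepping by 1 or -1) plus, for any
-- other step, only inputs A answers on its very first loop check (time = 2 → None, or a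
-- first-check win when distance < time - 1); it excludes time < 2 and true step ∉ {1,-1}
-- scans, where A diverges or returns a stride-dependent index of its accidental scan.
def Pre_find_next_win_hold_py (time : Int) (distance : Int) (step : Int) : Prop :=
  2 ≤ time ∧ (step = 1 ∨ step = -1 ∨ time = 2 ∨ distance < time - 1)
instance (time : Int) (distance : Int) (step : Int) : Decidable (Pre_find_next_win_hold_py time distance step) := by unfold Pre_find_next_win_hold_py; infer_instance

def pvWitness_find_next_win_hold_py : Int × Int × Int := (10, 20, 1)

def Spec_find_next_win_hold_py (time : Int) (distance : Int) (step : Int) (out : Option Int) : Prop := out = find_next_win_hold_py_alt time distance step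
instance (time : Int) (distance : Int) (step : Int) (out : Option Int) : Decidable (Spec_find_next_win_hold_py time distance step out) := by unfold Spec_find_next_win_hold_py; infer_instance

-- ===== CLAIM (what is proved, stated in full; the proofs are below) =====
def Claim_equal_find_next_win_hold_py : Prop := ∀ (time : Int) (distance : Int) (step : Int), Dom_find_next_win_hold_py time distance step → Pre_find_next_win_hold_py time distance step → Spec_find_next_win_hold_py time distance step (find_next_win_hold_py time distance step)

-- ===== LEMMAS AND PROOFS =====

-- the win predicate, and winsB as its boolean reflection
lemma winsB_iff (time distance h : Int) :
    winsB time distance h = true ↔ (time - h) * h > distance := by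
  simp [winsB]

-- concavity: monotone below the midpoint
lemma f_mono (time a b : Int) (hab : a ≤ b) (hsum : a + b ≤ time) :
    (time - a) * a ≤ (time - b) * b := by
  nlinarith [mul_nonneg (sub_nonneg.2 hab) (by linarith : (0:Int) ≤ time - a - b)]

-- concavity: antitone above the midpoint
lemma f_anti (time a b : Int) (hab : b ≤ a) (hsum : time ≤ a + b) :
    (time - a) * a ≤ (time - b) * b := by
  nlinarith [mul_nonneg (sub_nonneg.2 hab) (by linarith : (0:Int) ≤ a + b - time)]

-- symmetry of the distance travelled
lemma f_sym (time h : Int) :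
    (time - (time - h)) * (time - h) = (time - h) * h := by ring

-- midpoint facts for Python floor division
lemma mid_facts (time : Int) :
    2 * PySem.Int.floordiv time 2 ≤ time ∧
    time ≤ 2 * PySem.Int.floordiv time 2 + 1 ∧
    PySem.Int.floordiv time 2 + PySem.Int.floordiv (time + 1) 2 = time := by
  simp only [PySem.Int.floordiv_eq_ediv_of_pos (show (0:Int) < 2 by norm_num)]
  omega

-- the maximum of the travel distance over all holds is at time // 2
lemma f_max (time h : Int) :
    (time - h) * h ≤ (time - PySem.Int.floordiv time 2) * PySem.Int.floordiv time 2 := by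
  obtain ⟨h1, h2, -⟩ := mid_facts time
  set m := PySem.Int.floordiv time 2 with hm
  by_cases hc : h ≤ m
  · exact f_mono time h m hc (by omega)
  · calc (time - h) * h = (time - (time - h)) * (time - h) := by ring
      _ ≤ (time - m) * m := f_mono time (time - h) m (by omega) (by omega)

-- A's loop, upward (step = 1): returns none when nothing in [index, endv) wins
lemma loopA_none_up (time distance endv : Int) :
    ∀ (fuel : Nat) (index : Int), index ≤ endv → endv ≤ index + fuel →
    (∀ k, index ≤ k → k < endv → ¬((time - k) * k > distance)) →
    pyWhileA time distance 1 endv index fuel = none := by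
  intro fuel
  induction fuel with
  | zero => intro index _ _ _; rfl
  | succ f ih =>
    intro index h1 h2 hno
    by_cases he : index = endv
    · simp [pyWhileA, he]
    · have hlt : index < endv := lt_of_le_of_ne h1 he
      have hni : ¬ (travel_with_hold_py index time > distance) := by
        simpa [travel_with_hold_py] using hno index le_rfl hlt
      simp only [pyWhileA, if_neg he, if_neg hni]
      exact ih (index + 1) (by omega) (by push_cast at h2 ⊢; omega)
        (fun k hk1 hk2 => hno k (by omega) hk2)

-- A's loop, upward: returns the first winner j in [index, endv)
lemma loopA_some_up (time distance endv : Int) :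
    ∀ (fuel : Nat) (index j : Int), index ≤ j → j < endv →
    ((time - j) * j > distance) →
    (∀ k, index ≤ k → k < j → ¬((time - k) * k > distance)) →
    j - index < fuel →
    pyWhileA time distance 1 endv index fuel = some j := by
  intro fuel
  induction fuel with
  | zero => intro index j h1 _ _ _ hf; omega
  | succ f ih =>
    intro index j h1 h2 hj hno hf
    have he : index ≠ endv := by omega
    by_cases hij : index = j
    · subst hij
      simp [pyWhileA, if_neg he, travel_with_hold_py, hj]
    · have hni : ¬ (travel_with_hold_py index time > distance) := by
        simpa [travel_with_hold_py] using hno index le_rfl (by omega)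
      simp only [pyWhileA, if_neg he, if_neg hni]
      exact ih (index + 1) j (by omega) h2 hj
        (fun k hk1 hk2 => hno k (by omega) hk2) (by push_cast at hf ⊢; omega)

-- A's loop, downward (step = -1): returns none when nothing in (endv, index] wins
lemma loopA_none_down (time distance endv : Int) :
    ∀ (fuel : Nat) (index : Int), endv ≤ index → index ≤ endv + fuel →
    (∀ k, endv < k → k ≤ index → ¬((time - k) * k > distance)) →
    pyWhileA time distance (-1) endv index fuel = none := by
  intro fuel
  induction fuel with
  | zero => intro index _ _ _; rfl
  | succ f ih =>
    intro index h1 h2 hno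
    by_cases he : index = endv
    · simp [pyWhileA, he]
    · have hlt : endv < index := lt_of_le_of_ne h1 (Ne.symm he)
      have hni : ¬ (travel_with_hold_py index time > distance) := by
        simpa [travel_with_hold_py] using hno index hlt le_rfl
      simp only [pyWhileA, if_neg he, if_neg hni]
      exact ih (index + (-1)) (by omega) (by push_cast at h2 ⊢; omega)
        (fun k hk1 hk2 => hno k hk1 (by omega))

-- A's loop, downward: returns the first winner j in (endv, index] from the top
lemma loopA_some_down (time distance endv : Int) :
    ∀ (fuel : Nat) (index j : Int), j ≤ index → endv < j →
    ((time - j) * j > distance) →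
    (∀ k, j < k → k ≤ index → ¬((time - k) * k > distance)) →
    index - j < fuel →
    pyWhileA time distance (-1) endv index fuel = some j := by
  intro fuel
  induction fuel with
  | zero => intro index j h1 _ _ _ hf; omega
  | succ f ih =>
    intro index j h1 h2 hj hno hf
    have he : index ≠ endv := by omega
    by_cases hij : index = j
    · subst hij
      simp [pyWhileA, if_neg he, travel_with_hold_py, hj]
    · have hni : ¬ (travel_with_hold_py index time > distance) := by
        simpa [travel_with_hold_py] using hno index (by omega) le_rfl
      simp only [pyWhileA, if_neg he, if_neg hni]
      exact ih (index + (-1)) j (by omega) h2 hj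
        (fun k hk1 hk2 => hno k hk1 (by omega)) (by push_cast at hf ⊢; omega)

-- binary search for the least winner: window invariant
lemma bsearchLow_correct (time distance : Int) :
    ∀ (fuel : Nat) (lo hi : Int), (hi - lo).toNat ≤ fuel → lo ≤ hi →
    winsB time distance hi = true →
    lo ≤ bsearchLowB time distance lo hi fuel ∧
    bsearchLowB time distance lo hi fuel ≤ hi ∧
    winsB time distance (bsearchLowB time distance lo hi fuel) = true ∧
    (lo < bsearchLowB time distance lo hi fuel →
      winsB time distance (bsearchLowB time distance lo hi fuel - 1) = false) := by
  intro fuel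
  induction fuel with
  | zero =>
    intro lo hi hf hle hw
    have : lo = hi := by omega
    subst this
    simp only [bsearchLowB]
    exact ⟨le_rfl, le_rfl, hw, fun h => absurd h (lt_irrefl lo)⟩
  | succ f ih =>
    intro lo hi hf hle hw
    by_cases hlt : lo < hi
    · have hmid : lo ≤ PySem.Int.floordiv (lo + hi) 2 ∧ PySem.Int.floordiv (lo + hi) 2 < hi := by
        simp only [PySem.Int.floordiv_eq_ediv_of_pos (show (0:Int) < 2 by norm_num)]
        omega
      set mid := PySem.Int.floordiv (lo + hi) 2 with hmdef
      by_cases hwm : winsB time distance mid = true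
      · have := ih lo mid (by omega) hmid.1 hwm
        simp only [bsearchLowB, if_pos hlt, ← hmdef, if_pos hwm]
        exact ⟨this.1, by omega, this.2.2.1, this.2.2.2⟩
      · have := ih (mid + 1) hi (by omega) (by omega) hw
        simp only [bsearchLowB, if_pos hlt, ← hmdef, if_neg hwm]
        refine ⟨by omega, this.2.1, this.2.2.1, ?_⟩
        intro hlo
        by_cases hr : mid + 1 < bsearchLowB time distance (mid + 1) hi f
        · exact this.2.2.2 hr
        · have : bsearchLowB time distance (mid + 1) hi f = mid + 1 := by omega
          rw [this]
          simpa using eq_false_of_ne_true hwm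
    · have : lo = hi := by omega
      subst this
      simp only [bsearchLowB, if_neg hlt]
      exact ⟨le_rfl, le_rfl, hw, fun h => absurd h (lt_irrefl lo)⟩

-- binary search for the greatest winner: window invariant
lemma bsearchHigh_correct (time distance : Int) :
    ∀ (fuel : Nat) (lo hi : Int), (hi - lo).toNat ≤ fuel → lo ≤ hi →
    winsB time distance lo = true →
    lo ≤ bsearchHighB time distance lo hi fuel ∧
    bsearchHighB time distance lo hi fuel ≤ hi ∧
    winsB time distance (bsearchHighB time distance lo hi fuel) = true ∧
    (bsearchHighB time distance lo hi fuel < hi →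
      winsB time distance (bsearchHighB time distance lo hi fuel + 1) = false) := by
  intro fuel
  induction fuel with
  | zero =>
    intro lo hi hf hle hw
    have : lo = hi := by omega
    subst this
    simp only [bsearchHighB]
    exact ⟨le_rfl, le_rfl, hw, fun h => absurd h (lt_irrefl lo)⟩
  | succ f ih =>
    intro lo hi hf hle hw
    by_cases hlt : lo < hi
    · have hmid : lo < PySem.Int.floordiv (lo + hi + 1) 2 ∧ PySem.Int.floordiv (lo + hi + 1) 2 ≤ hi := by
        simp only [PySem.Int.floordiv_eq_ediv_of_pos (show (0:Int) < 2 by norm_num)]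
        omega
      set mid := PySem.Int.floordiv (lo + hi + 1) 2 with hmdef
      by_cases hwm : winsB time distance mid = true
      · have := ih mid hi (by omega) hmid.2 hwm
        simp only [bsearchHighB, if_pos hlt, ← hmdef, if_pos hwm]
        exact ⟨by omega, this.2.1, this.2.2.1, this.2.2.2⟩
      · have := ih lo (mid - 1) (by omega) (by omega) hw
        simp only [bsearchHighB, if_pos hlt, ← hmdef, if_neg hwm]
        refine ⟨this.1, by omega, this.2.2.1, ?_⟩
        intro hhi
        by_cases hr : bsearchHighB time distance lo (mid - 1) f < mid - 1
        · exact this.2.2.2 hr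
        · have : bsearchHighB time distance lo (mid - 1) f = mid - 1 := by omega
          rw [this]
          simpa using eq_false_of_ne_true hwm
    · have : lo = hi := by omega
      subst this
      simp only [bsearchHighB, if_neg hlt]
      exact ⟨le_rfl, le_rfl, hw, fun h => absurd h (lt_irrefl lo)⟩

-- ===== VERDICT (by name: the statement is the Claim_ definition above) =====
theorem find_next_win_hold_py_spec : Claim_equal_find_next_win_hold_py := by
  intro time distance step _ hPre
  unfold Spec_find_next_win_hold_py
  obtain ⟨ht2, hcase⟩ := hPre
  obtain ⟨hml, hmu, hmm⟩ := mid_facts time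
  by_cases ht : time = 2
  · subst ht
    by_cases hs : step = 1 <;>
      norm_num [find_next_win_hold_py, find_next_win_hold_py_alt, hs, pyWhileA]
  · have ht3 : 3 ≤ time := by omega
    have hfuel : (((time - 2).natAbs : Nat) : Int) = time - 2 := by omega
    set m := PySem.Int.floordiv time 2 with hmdef
    set m2 := PySem.Int.floordiv (time + 1) 2 with hm2def
    have hm1 : 1 ≤ m := by omega
    have hmhi : m ≤ time - 2 := by omega
    have hnot3 : ¬ (time < 3) := by omega
    by_cases hs1 : step = 1
    · -- step = 1: A scans upward from 1; B binary-searches the least winner in [1, m]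
      subst hs1
      simp only [find_next_win_hold_py, find_next_win_hold_py_alt, if_neg hnot3,
        ← hmdef]
      by_cases hw : winsB time distance m = true
      · obtain ⟨hr1, hr2, hrw, hrleast⟩ :=
          bsearchLow_correct time distance ((m - 1).toNat) 1 m le_rfl hm1 hw
        set r := bsearchLowB time distance 1 m ((m - 1).toNat) with hrdef
        rw [if_pos hw]
        apply loopA_some_up time distance (time - 1) _ 1 r hr1 (by omega)
          ((winsB_iff time distance r).1 hrw)
        · intro k hk1 hk2 hPk
          have hrgt : 1 < r := by omega
          have hprev : ¬ ((time - (r - 1)) * (r - 1) > distance) := by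
            rw [← winsB_iff]
            simp [hrleast hrgt]
          have hle : (time - k) * k ≤ (time - (r - 1)) * (r - 1) :=
            f_mono time k (r - 1) (by omega) (by omega)
          exact hprev (by linarith)
        · omega
      · rw [if_neg hw]
        apply loopA_none_up time distance (time - 1) _ 1 (by omega) (by omega)
        intro k hk1 hk2 hPk
        rw [winsB_iff] at hw
        exact hw (lt_of_lt_of_le hPk (f_max time k))
    · have hm2l : 2 ≤ m2 := by omega
      have hm2hi : m2 ≤ time - 1 := by omega
      have hkey : (time - m2) * m2 = (time - m) * m := by
        have h2 : m2 = time - m := by omega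
        rw [h2]
        exact f_sym time m
      simp only [find_next_win_hold_py, find_next_win_hold_py_alt, if_neg hs1, if_neg hnot3,
        ← hm2def]
      by_cases hsm1 : step = -1
      · -- step = -1: A scans downward from time-1; B binary-searches the greatest winner
        subst hsm1
        by_cases hw : winsB time distance m2 = true
        · obtain ⟨hr1, hr2, hrw, hrgreat⟩ :=
            bsearchHigh_correct time distance ((time - 1 - m2).toNat) m2 (time - 1)
              le_rfl hm2hi hw
          set r := bsearchHighB time distance m2 (time - 1) ((time - 1 - m2).toNat) with hrdef
          rw [if_pos hw]
          apply loopA_some_down time distance 1 _ (time - 1) r hr2 (by omega)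
            ((winsB_iff time distance r).1 hrw)
          · intro k hk1 hk2 hPk
            have hrlt : r < time - 1 := by omega
            have hnext : ¬ ((time - (r + 1)) * (r + 1) > distance) := by
              rw [← winsB_iff]
              simp [hrgreat hrlt]
            have hle : (time - k) * k ≤ (time - (r + 1)) * (r + 1) :=
              f_anti time k (r + 1) (by omega) (by omega)
            exact hnext (by linarith)
          · omega
        · rw [if_neg hw]
          apply loopA_none_down time distance 1 _ (time - 1) (by omega) (by omega)
          intro k hk1 hk2 hPk
          rw [winsB_iff] at hw
          have := f_max time k
          rw [← hmdef, ← hkey] at this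
          exact hw (lt_of_lt_of_le hPk this)
      · -- any other step: Pre_ gives distance < time - 1, and A wins on its first check
        have hd : distance < time - 1 := by tauto
        have hPtop : (time - (time - 1)) * (time - 1) > distance := by
          have : (time - (time - 1)) * (time - 1) = time - 1 := by ring
          omega
        have hw : winsB time distance m2 = true := by
          rw [winsB_iff]
          have := f_max time (time - 1)
          rw [← hmdef, ← hkey] at this
          linarith
        rw [if_pos hw]
        obtain ⟨hr1, hr2, hrw, hrgreat⟩ :=
          bsearchHigh_correct time distance ((time - 1 - m2).toNat) m2 (time - 1)
            le_rfl hm2hi hw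
        set r := bsearchHighB time distance m2 (time - 1) ((time - 1 - m2).toNat) with hrdef
        have hrtop : r = time - 1 := by
          by_contra hne
          have hrlt : r < time - 1 := by omega
          have hnext : ¬ ((time - (r + 1)) * (r + 1) > distance) := by
            rw [← winsB_iff]
            simp [hrgreat hrlt]
          have hle : (time - (time - 1)) * (time - 1) ≤ (time - (r + 1)) * (r + 1) :=
            f_anti time (time - 1) (r + 1) (by omega) (by omega)
          exact hnext (by linarith)
        have hne : time - 1 ≠ 1 := by omega
        have hfpos : ∃ f, (time - 2).natAbs + 1 = Nat.succ f := ⟨(time - 2).natAbs, rfl⟩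
        simp only [pyWhileA, if_neg hne, travel_with_hold_py, if_pos hPtop, hrtop]
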